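-- pv_equiv track=rewrite | github.com/Ilanshk/NumericAnalysis2022 | MatrixSolution.py | check_if_matrix_has_zero_on_diagonal
-- ===== SOURCE A (Python) =====
-- def check_if_matrix_has_zero_on_diagonal(mat):
--     checking = set()
--     for line in range(len(mat)):
--         found_zero = 0
--         for column in range(len(mat)):
--             if (mat[line])[column] == 0 and line == column:
--                 found_zero = 1
--                 checking.add(line)
--         if found_zero == 0:
--             checking.add(0)
--     return checking
-- ===== SOURCE B (Python) =====
-- def check_if_matrix_has_zero_on_diagonal(mat):
--     checking = set()
--     for i, row in enumerate(mat):
--         checking.add(i if row[i] == 0 else 0)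
--     return checking
-- ===== Notes on version B (the rewrite author's own statement) =====
-- stated objective: faster
-- what changed: B replaces A's nested scan over all n*n index pairs (where only line==column ever fires) by a single enumerate pass reading just the diagonal entry of each row.
import Mathlib
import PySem

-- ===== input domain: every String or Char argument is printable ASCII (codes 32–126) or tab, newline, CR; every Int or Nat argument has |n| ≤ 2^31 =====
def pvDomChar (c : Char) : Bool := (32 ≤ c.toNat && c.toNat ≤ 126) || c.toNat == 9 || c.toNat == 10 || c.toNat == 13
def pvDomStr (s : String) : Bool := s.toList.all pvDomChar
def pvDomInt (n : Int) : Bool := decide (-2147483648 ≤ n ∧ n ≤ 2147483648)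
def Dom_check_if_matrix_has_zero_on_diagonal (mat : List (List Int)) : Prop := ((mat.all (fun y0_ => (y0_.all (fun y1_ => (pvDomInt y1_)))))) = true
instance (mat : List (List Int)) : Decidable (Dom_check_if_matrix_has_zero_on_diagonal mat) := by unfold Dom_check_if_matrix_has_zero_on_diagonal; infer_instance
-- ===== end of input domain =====

-- B replaces A's nested O(n^2) scan (only line==column ever fires) by a single pass over the diagonal; return value compared as a set built in the same insertion order.


-- ===== PORT A =====
def check_if_matrix_has_zero_on_diagonal (mat : List (List Int)) : List Int :=
  (PySem.List.pyRange 0 (mat.length : Int) 1).foldl (fun checking line =>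
    let st :=
      (PySem.List.pyRange 0 (mat.length : Int) 1).foldl
        (fun (st : Int × PySem.Set Int) column =>
          if PySem.List.pyGetD (PySem.List.pyGetD mat line []) column 0 = 0 ∧ line = column
          then (1, PySem.Set.add st.2 line)
          else st)
        (0, checking)
    if st.1 = 0 then PySem.Set.add st.2 0 else st.2)
    PySem.Set.empty

-- ===== PORT B =====
-- 'for i, row in enumerate(mat)' as structural recursion with the running index
def pvAltGo : List (List Int) → Int → PySem.Set Int → PySem.Set Int
  | [], _, s => s
  | row :: rest, i, s =>
      pvAltGo rest (i + 1) (PySem.Set.add s (if PySem.List.pyGetD row i 0 = 0 then i else 0))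

def check_if_matrix_has_zero_on_diagonal_alt (mat : List (List Int)) : List Int :=
  pvAltGo mat 0 PySem.Set.empty

-- ===== PRECONDITION & SPEC =====
-- Pre_: exactly where Python A returns (A reads every row at all columns 0..len(mat)-1, an
-- IndexError — none in the port — whenever some row is shorter than the matrix).
def Pre_check_if_matrix_has_zero_on_diagonal (mat : List (List Int)) : Prop :=
  ∀ row ∈ mat, mat.length ≤ row.length
instance (mat : List (List Int)) : Decidable (Pre_check_if_matrix_has_zero_on_diagonal mat) := by
  unfold Pre_check_if_matrix_has_zero_on_diagonal; infer_instance

def pvWitness_check_if_matrix_has_zero_on_diagonal : List (List Int) := [[0, 1], [2, 3]]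

def Spec_check_if_matrix_has_zero_on_diagonal (mat : List (List Int)) (out : List Int) : Prop :=
  out = check_if_matrix_has_zero_on_diagonal_alt mat
instance (mat : List (List Int)) (out : List Int) : Decidable (Spec_check_if_matrix_has_zero_on_diagonal mat out) := by
  unfold Spec_check_if_matrix_has_zero_on_diagonal; infer_instance

-- ===== CLAIM (what is proved, stated in full; the proofs are below) =====
def Claim_equal_check_if_matrix_has_zero_on_diagonal : Prop := ∀ (mat : List (List Int)), Dom_check_if_matrix_has_zero_on_diagonal mat → Pre_check_if_matrix_has_zero_on_diagonal mat → Spec_check_if_matrix_has_zero_on_diagonal mat (check_if_matrix_has_zero_on_diagonal mat)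


-- ===== LEMMAS AND PROOFS =====

-- a fold whose step fixes every state on every member of the list is the identity
theorem pv_foldl_skip {α β : Type} (f : β → α → β) (l : List α) (s : β)
    (h : ∀ s' c, c ∈ l → f s' c = s') : l.foldl f s = s := by
  induction l generalizing s with
  | nil => rfl
  | cons x xs ih =>
      simp only [List.foldl_cons, h s x (by simp)]
      exact ih s fun s' c hc => h s' c (by simp [hc])

theorem pv_inner (mat : List (List Int)) (line : Int) (checking : PySem.Set Int)
    (h0 : 0 ≤ line) (hn : line < (mat.length : Int)) :
    (PySem.List.pyRange 0 (mat.length : Int) 1).foldl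
      (fun (st : Int × PySem.Set Int) column =>
        if PySem.List.pyGetD (PySem.List.pyGetD mat line []) column 0 = 0 ∧ line = column
        then (1, PySem.Set.add st.2 line)
        else st)
      (0, checking)
      = if PySem.List.pyGetD (PySem.List.pyGetD mat line []) line 0 = 0
        then (1, PySem.Set.add checking line)
        else (0, checking) := by
  rw [PySem.List.pyRange_one_append 0 line (mat.length : Int) h0 (le_of_lt hn),
      List.foldl_append,
      pv_foldl_skip _ (PySem.List.pyRange 0 line 1) (0, checking)
        (by
          intro s' c hc
          rw [PySem.List.mem_pyRange_one] at hc
          simp only [ite_eq_right_iff]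
          intro ⟨_, hlc⟩; omega),
      PySem.List.pyRange_one_cons hn, List.foldl_cons]
  by_cases hz : PySem.List.pyGetD (PySem.List.pyGetD mat line []) line 0 = 0
  · simp only [hz, and_self, if_true]
    exact pv_foldl_skip _ _ _ (by
      intro s' c hc
      rw [PySem.List.mem_pyRange_one] at hc
      simp only [ite_eq_right_iff]
      intro ⟨_, hlc⟩; omega)
  · rw [if_neg (by simp [hz]), if_neg hz]
    exact pv_foldl_skip _ _ _ (by
      intro s' c hc
      rw [PySem.List.mem_pyRange_one] at hc
      simp only [ite_eq_right_iff]
      intro ⟨_, hlc⟩; omega)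

theorem pv_tail (mat : List (List Int)) :
    ∀ (suf : List (List Int)) (k : Nat) (s : PySem.Set Int), mat.drop k = suf →
    (PySem.List.pyRange (k : Int) (mat.length : Int) 1).foldl
      (fun checking line =>
        let st :=
          (PySem.List.pyRange 0 (mat.length : Int) 1).foldl
            (fun (st : Int × PySem.Set Int) column =>
              if PySem.List.pyGetD (PySem.List.pyGetD mat line []) column 0 = 0 ∧ line = column
              then (1, PySem.Set.add st.2 line)
              else st)
            (0, checking)
        if st.1 = 0 then PySem.Set.add st.2 0 else st.2) s
      = pvAltGo suf (k : Int) s := by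
  intro suf
  induction suf with
  | nil =>
      intro k s hd
      have hk : mat.length ≤ k := by
        by_contra h
        have := List.drop_eq_nil_iff.mp hd
        omega
      rw [PySem.List.pyRange_one_eq_nil (show (mat.length : Int) ≤ (k : Int) by exact_mod_cast hk)]
      rfl
  | cons row rest ih =>
      intro k s hd
      have hk : k < mat.length := by
        by_contra h
        rw [List.drop_eq_nil_of_le (by omega)] at hd
        simp at hd
      have hrow : PySem.List.pyGetD mat (k : Int) [] = row := by
        have h2 : (mat.drop k)[0]? = some row := by rw [hd]; rfl
        rw [List.getElem?_drop] at h2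
        simp only [Nat.add_zero] at h2
        rw [PySem.List.pyGetD_natCast]
        simp [List.getD, h2]
      have hd' : mat.drop (k + 1) = rest := by
        have h3 : mat.drop (k + 1) = (mat.drop k).drop 1 := by
          rw [List.drop_drop]
        rw [h3, hd]; rfl
      have hlt : (k : Int) < (mat.length : Int) := by exact_mod_cast hk
      rw [PySem.List.pyRange_one_cons hlt]
      simp only [List.foldl_cons]
      rw [pv_inner mat (k : Int) s (by positivity) hlt, hrow]
      by_cases hz : PySem.List.pyGetD row (k : Int) 0 = 0
      · rw [if_pos hz, if_neg one_ne_zero]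
        have h4 := ih (k + 1) (PySem.Set.add s (k : Int)) hd'
        push_cast at h4 ⊢
        rw [h4]
        simp [pvAltGo, hz]
      · rw [if_neg hz, if_pos rfl]
        have h4 := ih (k + 1) (PySem.Set.add s 0) hd'
        push_cast at h4 ⊢
        rw [h4]
        rw [PySem.List.pyGetD_natCast] at hz
        simp only [List.getD] at hz
        simp [pvAltGo, hz]

-- ===== VERDICT (by name: the statement is the Claim_ definition above) =====
theorem check_if_matrix_has_zero_on_diagonal_spec : Claim_equal_check_if_matrix_has_zero_on_diagonal := by
  intro mat _ _
  unfold Spec_check_if_matrix_has_zero_on_diagonal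
  unfold check_if_matrix_has_zero_on_diagonal check_if_matrix_has_zero_on_diagonal_alt
  simpa using pv_tail mat mat 0 PySem.Set.empty rfl
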